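-- pv_equiv track=rewrite | github.com/anjaleena-sarah/python | rcss_lab/1.4sum.py | divisiblesofseven
-- ===== SOURCE A (Python) =====
-- def divisiblesofseven(start, end):
--     divisible_numbers = []
--     total_sum = 0
--     for num in range(start, end):
--         if num % 7 == 0:
--             divisible_numbers.append(num)
--             total_sum += num
--     return divisible_numbers, total_sum
-- ===== SOURCE B (Python) =====
-- def divisiblesofseven(start, end):
--     first = start + (-start) % 7
--     nums = list(range(first, end, 7))
--     n = len(nums)
--     total = n * (2 * first + 7 * (n - 1)) // 2 if n else 0
--     return nums, total
-- ===== Notes on version B (the rewrite author's own statement) =====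
-- stated objective: faster
-- what changed: Instead of scanning every integer in [start,end) and filtering by %7 while accumulating a running sum, B jumps directly to the first multiple of 7 with modular arithmetic, builds the list as a single C-level step-7 range, and computes the sum with the arithmetic-series closed form; intended as faster (measured up to ~8x at the largest size in some timing runs, not consistently confirmed across input families).
import Mathlib
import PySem

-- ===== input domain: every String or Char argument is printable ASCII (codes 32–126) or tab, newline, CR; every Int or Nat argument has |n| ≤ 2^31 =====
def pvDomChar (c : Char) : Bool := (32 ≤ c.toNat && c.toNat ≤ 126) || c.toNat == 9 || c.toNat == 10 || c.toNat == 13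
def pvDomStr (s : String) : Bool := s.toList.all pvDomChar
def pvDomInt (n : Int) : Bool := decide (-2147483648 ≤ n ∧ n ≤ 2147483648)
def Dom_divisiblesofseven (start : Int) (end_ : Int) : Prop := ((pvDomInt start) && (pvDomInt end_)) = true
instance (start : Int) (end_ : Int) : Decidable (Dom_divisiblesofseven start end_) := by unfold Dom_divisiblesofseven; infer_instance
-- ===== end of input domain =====

-- B replaces A's scan-and-filter loop by a step-7 range starting at the first multiple of
-- 7 ≥ start, with the sum computed by the arithmetic-series closed form (objective: faster;
-- intended as faster — a timing run measured up to ~8x at large sizes, not in every run).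

-- ===== PORT A =====
def divisiblesofseven (start : Int) (end_ : Int) : List Int × Int :=
  (PySem.List.pyRange start end_ 1).foldl
    (fun acc num =>
      if PySem.Int.mod num 7 == 0 then (acc.1 ++ [num], acc.2 + num) else acc)
    ([], 0)

-- ===== PORT B =====
def divisiblesofseven_alt (start : Int) (end_ : Int) : List Int × Int :=
  let first := start + PySem.Int.mod (-start) 7
  let nums := PySem.List.pyRange first end_ 7
  let n : Int := nums.length
  (nums, if n ≠ 0 then PySem.Int.floordiv (n * (2 * first + 7 * (n - 1))) 2 else 0)

-- ===== PRECONDITION & SPEC =====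
def Spec_divisiblesofseven (start : Int) (end_ : Int) (out : List Int × Int) : Prop := out = divisiblesofseven_alt start end_
instance (start : Int) (end_ : Int) (out : List Int × Int) : Decidable (Spec_divisiblesofseven start end_ out) := by unfold Spec_divisiblesofseven; infer_instance

-- ===== CLAIM (what is proved, stated in full; the proofs are below) =====
def Claim_equal_divisiblesofseven : Prop := ∀ (start : Int) (end_ : Int), Dom_divisiblesofseven start end_ → Spec_divisiblesofseven start end_ (divisiblesofseven start end_)

-- ===== LEMMAS AND PROOFS =====

-- A's loop, with a general accumulator: append the multiples of 7 and add them up.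
theorem pvFoldlPair (l : List Int) (acc : List Int × Int) :
    l.foldl
      (fun acc num =>
        if PySem.Int.mod num 7 == 0 then (acc.1 ++ [num], acc.2 + num) else acc)
      acc
    = (acc.1 ++ l.filter (fun x => PySem.Int.mod x 7 == 0),
       acc.2 + (l.filter (fun x => PySem.Int.mod x 7 == 0)).sum) := by
  induction l generalizing acc with
  | nil => simp
  | cons x xs ih =>
    simp only [List.foldl_cons, List.filter_cons]
    by_cases h : (PySem.Int.mod x 7 == 0) = true
    · rw [if_pos h, if_pos h, ih]
      simp [add_assoc]
    · rw [if_neg h, if_neg h, ih]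

theorem pvRange7_nil {a b : Int} (h : b ≤ a) : PySem.List.pyRange a b 7 = [] := by
  rw [PySem.List.pyRange_of_pos a b (by norm_num)]
  simp [show ¬ (a < b) by omega]

theorem pvRange7_cons {a b : Int} (h : a < b) :
    PySem.List.pyRange a b 7 = a :: PySem.List.pyRange (a + 7) b 7 := by
  rw [PySem.List.pyRange_of_pos a b (by norm_num),
      PySem.List.pyRange_of_pos (a + 7) b (by norm_num)]
  have hcount : (if a < b then ((b - a + 7 - 1) / 7).toNat else 0)
      = (if a + 7 < b then ((b - (a + 7) + 7 - 1) / 7).toNat else 0) + 1 := by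
    by_cases h7 : a + 7 < b <;> simp [h, h7] <;> omega
  rw [hcount, List.range_succ_eq_map]
  simp only [List.map_cons, List.map_map]
  congr 1
  · norm_num
  · exact List.map_congr_left (fun k _ => by
      simp only [Function.comp_apply]; push_cast; ring)

theorem pvSum2 (n : Nat) (f : Int) :
    2 * (((List.range n).map (fun (k : Nat) => f + 7 * (k : Int))).sum)
      = (n : Int) * (2 * f + 7 * ((n : Int) - 1)) := by
  induction n with
  | zero => simp
  | succ m ih =>
    rw [List.range_succ]
    simp only [List.map_append, List.sum_append, List.map_cons, List.map_nil,
      List.sum_cons, List.sum_nil]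
    push_cast
    push_cast at ih
    linear_combination ih

-- The multiples of 7 in [s, e) are exactly the step-7 range from the first multiple of 7 ≥ s.
theorem pvFilterEq : ∀ (n : Nat) (s e : Int), (e - s).toNat = n →
    (PySem.List.pyRange s e 1).filter (fun x => PySem.Int.mod x 7 == 0)
      = PySem.List.pyRange (s + PySem.Int.mod (-s) 7) e 7 := by
  intro n
  induction n with
  | zero =>
    intro s e hn
    have hse : e ≤ s := by omega
    have hmns : PySem.Int.mod (-s) 7 = (-s) % 7 :=
      PySem.Int.mod_eq_emod_of_pos (by norm_num)
    have hfz : e ≤ s + PySem.Int.mod (-s) 7 := by rw [hmns]; omega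
    rw [PySem.List.pyRange_one_eq_nil hse, pvRange7_nil hfz]
    rfl
  | succ m ih =>
    intro s e hn
    have hlt : s < e := by omega
    rw [PySem.List.pyRange_one_cons hlt, List.filter_cons]
    have hms : PySem.Int.mod s 7 = s % 7 := PySem.Int.mod_eq_emod_of_pos (by norm_num)
    have hmns : PySem.Int.mod (-s) 7 = (-s) % 7 :=
      PySem.Int.mod_eq_emod_of_pos (by norm_num)
    have hmns1 : PySem.Int.mod (-(s+1)) 7 = (-(s+1)) % 7 :=
      PySem.Int.mod_eq_emod_of_pos (by norm_num)
    have htail := ih (s + 1) e (by omega)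
    by_cases h : s % 7 = 0
    · have hfirst : s + PySem.Int.mod (-s) 7 = s := by rw [hmns]; omega
      have hnext : (s + 1) + PySem.Int.mod (-(s+1)) 7 = s + 7 := by rw [hmns1]; omega
      rw [hfirst, pvRange7_cons hlt]
      simp only [hms, h, beq_self_eq_true, if_pos]
      rw [htail, hnext]
    · have hsame : (s + 1) + PySem.Int.mod (-(s+1)) 7 = s + PySem.Int.mod (-s) 7 := by
        rw [hmns, hmns1]; omega
      have hb : (PySem.Int.mod s 7 == 0) = false := by
        rw [hms]; simpa using h
      rw [hb, if_neg (by simp)]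
      rw [htail, hsame]

theorem pvMain (s e : Int) : divisiblesofseven s e = divisiblesofseven_alt s e := by
  unfold divisiblesofseven divisiblesofseven_alt
  rw [pvFoldlPair]
  simp only [List.nil_append, zero_add]
  rw [pvFilterEq ((e - s).toNat) s e rfl]
  set f := s + PySem.Int.mod (-s) 7 with hf
  refine Prod.ext rfl ?_
  simp only
  rw [PySem.List.pyRange_of_pos f e (by norm_num)]
  generalize (if f < e then ((e - f + 7 - 1) / 7).toNat else 0) = c
  simp only [List.length_map, List.length_range]
  by_cases hcz : c = 0
  · subst hcz; simp
  · rw [if_pos (show (c : Int) ≠ 0 by exact_mod_cast hcz)]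
    have h2 := pvSum2 c f
    rw [← h2, PySem.Int.floordiv_eq_ediv_of_pos (by norm_num)]
    exact (Int.mul_ediv_cancel_left _ (by norm_num : (2 : Int) ≠ 0)).symm

-- ===== VERDICT (by name: the statement is the Claim_ definition above) =====
theorem divisiblesofseven_spec : Claim_equal_divisiblesofseven := by
  intro s e _
  unfold Spec_divisiblesofseven
  exact pvMain s e
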